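-- pv_equiv track=rewrite | github.com/m-adamek/Mock3 | mock3-2/p7.py | f
-- ===== SOURCE A (Python) =====
-- def f(d):
--     # Create a set to keep track of vehicles in the car park
--     parked_vehicles = set()
--
--     # Loop through each entry in the list
--     for car, action in d:
--         if action == "in":
--             # Add the car to the car park
--             parked_vehicles.add(car)
--         elif action == "out":
--             # Remove the car from the car park
--             parked_vehicles.discard(car)
--
--     # Return the sorted list of vehicles that remain in the car park
--     return sorted(parked_vehicles)
-- ===== SOURCE B (Python) =====
-- def f(d):
--     # A car is parked iff its last "in"/"out" event is "in": scan in reverse,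
--     # deciding each car at its first (reversed) relevant event.
--     seen = set()
--     parked = set()
--     for car, action in reversed(d):
--         if (action == "in" or action == "out") and car not in seen:
--             seen.add(car)
--             if action == "in":
--                 parked.add(car)
--     return sorted(parked)
-- ===== Notes on version B (the rewrite author's own statement) =====
-- stated objective: alternative
-- what changed: Replaces the forward add/discard set fold by a reverse scan that decides each car at its first reversed relevant event, maintaining a seen-set guard and a parked result set.
import Mathlib
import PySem

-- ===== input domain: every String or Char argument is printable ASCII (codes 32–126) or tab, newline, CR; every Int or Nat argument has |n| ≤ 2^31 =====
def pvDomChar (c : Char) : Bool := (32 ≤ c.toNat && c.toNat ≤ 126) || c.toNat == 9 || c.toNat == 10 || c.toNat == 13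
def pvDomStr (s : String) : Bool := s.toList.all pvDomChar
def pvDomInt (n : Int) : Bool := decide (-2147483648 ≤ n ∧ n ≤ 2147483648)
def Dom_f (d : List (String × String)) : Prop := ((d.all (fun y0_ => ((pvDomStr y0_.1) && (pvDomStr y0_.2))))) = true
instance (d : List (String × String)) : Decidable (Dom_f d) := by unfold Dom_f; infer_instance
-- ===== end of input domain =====

-- B changes the decomposition (reverse scan with a first-occurrence guard instead of a forward
-- add/discard fold); same cost, proved to return the same sorted list.

-- ===== PORT A =====
-- one event of A's forward loop: add on "in", discard on "out", else nothing
def fStep (s : PySem.Set String) (e : String × String) : PySem.Set String :=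
  if e.2 = "in" then PySem.Set.add s e.1
  else if e.2 = "out" then PySem.Set.discard s e.1
  else s

def f (d : List (String × String)) : List String :=
  PySem.List.sorted (d.foldl fStep PySem.Set.empty) (fun x => x) false

-- ===== PORT B =====
-- one event of B's reversed loop: first relevant occurrence of a car decides it
def fAltStep (sp : PySem.Set String × PySem.Set String) (e : String × String) :
    PySem.Set String × PySem.Set String :=
  if (e.2 = "in" ∨ e.2 = "out") ∧ ¬ PySem.Set.contains sp.1 e.1 = true then
    (PySem.Set.add sp.1 e.1, if e.2 = "in" then PySem.Set.add sp.2 e.1 else sp.2)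
  else sp

def f_alt (d : List (String × String)) : List String :=
  PySem.List.sorted (d.reverse.foldl fAltStep (PySem.Set.empty, PySem.Set.empty)).2
    (fun x => x) false

-- ===== PRECONDITION & SPEC =====
def Spec_f (d : List (String × String)) (out : List String) : Prop := out = f_alt d
instance (d : List (String × String)) (out : List String) : Decidable (Spec_f d out) := by unfold Spec_f; infer_instance

-- ===== CLAIM (what is proved, stated in full; the proofs are below) =====
def Claim_equal_f : Prop := ∀ (d : List (String × String)), Dom_f d → Spec_f d (f d)

-- ===== LEMMAS AND PROOFS =====

-- the last relevant ("in"/"out") event for x in d decides, starting from b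
def statusD (x : String) (d : List (String × String)) (b : Bool) : Bool :=
  d.foldl (fun b e =>
    if e.1 = x ∧ e.2 = "in" then true
    else if e.1 = x ∧ e.2 = "out" then false
    else b) b

-- the first relevant event for x in l decides; false if none
def firstStatus (x : String) : List (String × String) → Bool
  | [] => false
  | e :: t => if e.1 = x ∧ (e.2 = "in" ∨ e.2 = "out") then decide (e.2 = "in")
              else firstStatus x t

theorem mem_foldl_fStep (x : String) (d : List (String × String)) (s : PySem.Set String) :
    (x ∈ d.foldl fStep s) = (statusD x d (decide (x ∈ s)) = true) := by
  induction d generalizing s with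
  | nil => simp [statusD]
  | cons e t ih =>
    simp only [List.foldl_cons, statusD, fStep] at *
    by_cases hin : e.2 = "in"
    · by_cases hx : e.1 = x
      · subst hx; simp [hin, ih, PySem.Set.mem_add]
      · simp [hin, ih, PySem.Set.mem_add, hx, Ne.symm hx]
    · by_cases hout : e.2 = "out"
      · by_cases hx : e.1 = x
        · subst hx; simp [hout, ih, PySem.Set.mem_discard]
        · simp [hout, ih, PySem.Set.mem_discard, hx, Ne.symm hx]
      · simp [hin, hout, ih]

theorem mem_foldl_fAltStep_of_seen (x : String) (l : List (String × String))
    (sp : PySem.Set String × PySem.Set String) (hx : x ∈ sp.1) :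
    (x ∈ (l.foldl fAltStep sp).2 ↔ x ∈ sp.2) ∧ x ∈ (l.foldl fAltStep sp).1 := by
  induction l generalizing sp with
  | nil => exact ⟨Iff.rfl, hx⟩
  | cons e t ih =>
    simp only [List.foldl_cons, fAltStep]
    by_cases hc : (e.2 = "in" ∨ e.2 = "out") ∧ ¬ PySem.Set.contains sp.1 e.1 = true
    · have hne : e.1 ≠ x := by
        intro h; exact hc.2 ((PySem.Set.contains_iff _ _).mpr (h ▸ hx))
      rw [if_pos hc]
      have := ih (sp := (PySem.Set.add sp.1 e.1,
          if e.2 = "in" then PySem.Set.add sp.2 e.1 else sp.2))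
        (by simp [PySem.Set.mem_add, hx])
      refine ⟨this.1.trans ?_, this.2⟩
      split <;> simp [PySem.Set.mem_add, Ne.symm hne]
    · simp only [hc, if_false]
      exact ih sp hx

theorem mem_foldl_fAltStep (x : String) (l : List (String × String))
    (sp : PySem.Set String × PySem.Set String) (h1 : x ∉ sp.1) (h2 : x ∉ sp.2) :
    (x ∈ (l.foldl fAltStep sp).2) = (firstStatus x l = true) := by
  induction l generalizing sp with
  | nil => simp [firstStatus, h2]
  | cons e t ih =>
    simp only [List.foldl_cons, fAltStep, firstStatus]
    by_cases hx : e.1 = x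
    · subst hx
      have hcon : ¬ PySem.Set.contains sp.1 e.1 = true := by
        intro h; exact h1 ((PySem.Set.contains_iff _ _).mp h)
      by_cases hrel : e.2 = "in" ∨ e.2 = "out"
      · rw [if_pos ⟨hrel, hcon⟩]
        have := mem_foldl_fAltStep_of_seen e.1 t
          (sp := (PySem.Set.add sp.1 e.1,
            if e.2 = "in" then PySem.Set.add sp.2 e.1 else sp.2))
          (by simp [PySem.Set.mem_add])
        rw [eq_iff_iff, this.1]
        split
        · next hin => simp [PySem.Set.mem_add, hin]
        · next hin =>
            have hout : e.2 = "out" := hrel.resolve_left hin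
            simp [h2, hout]
      · rw [if_neg (fun h => hrel h.1)]
        rw [if_neg (by simp [hrel])]
        exact ih sp h1 h2
    · have hne : ¬ (e.1 = x ∧ (e.2 = "in" ∨ e.2 = "out")) := fun h => hx h.1
      rw [if_neg hne]
      by_cases hc : (e.2 = "in" ∨ e.2 = "out") ∧ ¬ PySem.Set.contains sp.1 e.1 = true
      · rw [if_pos hc]
        refine ih _ ?_ ?_
        · simp [PySem.Set.mem_add, h1, Ne.symm hx]
        · split
          · simp [PySem.Set.mem_add, h2, Ne.symm hx]
          · exact h2
      · rw [if_neg hc]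
        exact ih sp h1 h2

theorem firstStatus_reverse (x : String) (d : List (String × String)) :
    firstStatus x d.reverse = statusD x d false := by
  induction d using List.reverseRecOn with
  | nil => simp [firstStatus, statusD]
  | append_singleton t e ih =>
    rw [List.reverse_append, List.reverse_singleton]
    simp only [List.singleton_append, firstStatus, statusD, List.foldl_append, List.foldl_cons,
      List.foldl_nil]
    by_cases hx : e.1 = x
    · subst hx
      by_cases hin : e.2 = "in"
      · simp [hin]
      · by_cases hout : e.2 = "out"
        · simp [hout]
        · simp [hin, hout, ih, statusD]
    · simp [hx, ih, statusD]

theorem nodup_foldl_fStep (d : List (String × String)) (s : PySem.Set String)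
    (hs : s.Nodup) : (d.foldl fStep s).Nodup := by
  induction d generalizing s with
  | nil => exact hs
  | cons e t ih =>
    refine ih _ ?_
    unfold fStep
    split
    · exact PySem.Set.nodup_add _ _ hs
    · split
      · exact PySem.Set.nodup_discard _ _ hs
      · exact hs

theorem nodup_foldl_fAltStep (l : List (String × String))
    (sp : PySem.Set String × PySem.Set String) (hs : sp.2.Nodup) :
    (l.foldl fAltStep sp).2.Nodup := by
  induction l generalizing sp with
  | nil => exact hs
  | cons e t ih =>
    refine ih _ ?_
    unfold fAltStep
    split
    · split
      · exact PySem.Set.nodup_add _ _ hs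
      · exact hs
    · exact hs

theorem f_spec : Claim_equal_f := by
  intro d _
  unfold Spec_f f f_alt
  refine PySem.List.sorted_eq_sorted_of_perm _ _ _ (fun a b h => h) ?_
  rw [List.perm_ext_iff_of_nodup
    (nodup_foldl_fStep d PySem.Set.empty List.nodup_nil)
    (nodup_foldl_fAltStep d.reverse (PySem.Set.empty, PySem.Set.empty) List.nodup_nil)]
  intro x
  rw [← eq_iff_iff]
  rw [mem_foldl_fStep x d PySem.Set.empty,
      mem_foldl_fAltStep x d.reverse (PySem.Set.empty, PySem.Set.empty)
        (List.not_mem_nil) (List.not_mem_nil),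
      firstStatus_reverse]
  simp [PySem.Set.empty]
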